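-- pv_equiv track=rewrite | github.com/komajun365/ac-library-python | tests/test_convolution.py | conv_naive
-- ===== SOURCE A (Python) =====
-- def conv_naive(a, b, mod):
--     n = len(a)
--     m = len(b)
--     c = [0] * (n+m-1)
--     for i in range(n):
--         for j in range(m):
--             c[i+j] += a[i] * b[j]
--             c[i+j] %= mod
--
--     return c
-- ===== SOURCE B (Python) =====
-- def conv_naive(a, b, mod):
--     n, m = len(a), len(b)
--     return [sum(a[i] * b[k - i] for i in range(max(0, k - m + 1), min(k + 1, n))) % mod
--             for k in range(n + m - 1)]
-- ===== Notes on version B (the rewrite author's own statement) =====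
-- stated objective: faster
-- what changed: B computes each output coefficient k directly as one windowed generator sum over i of a[i]*b[k-i] with a single final % mod, instead of A's pairwise accumulation into a mutated list with an index write and a modulo after every addition.
-- outside the precondition, e.g. on conv_naive([], [1, 2], 0): A returns [0], B raises ZeroDivisionError
import Mathlib
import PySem

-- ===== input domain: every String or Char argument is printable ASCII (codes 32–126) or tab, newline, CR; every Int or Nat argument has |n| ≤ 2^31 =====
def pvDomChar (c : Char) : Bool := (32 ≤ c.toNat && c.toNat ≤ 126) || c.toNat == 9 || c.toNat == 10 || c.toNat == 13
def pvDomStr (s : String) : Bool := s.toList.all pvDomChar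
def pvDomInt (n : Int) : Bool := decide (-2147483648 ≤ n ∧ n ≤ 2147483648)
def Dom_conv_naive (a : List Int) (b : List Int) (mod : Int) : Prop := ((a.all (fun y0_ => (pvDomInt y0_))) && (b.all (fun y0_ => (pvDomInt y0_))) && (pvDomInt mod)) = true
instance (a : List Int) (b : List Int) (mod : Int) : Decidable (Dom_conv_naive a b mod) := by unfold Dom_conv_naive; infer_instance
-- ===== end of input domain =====

-- B computes each output coefficient directly as one windowed sum reduced by a single
-- final `% mod`, instead of A's pairwise accumulation into a mutated array with a modulo
-- per addition (same O(n·m) asymptotics; measurably faster by a constant factor).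

-- ===== PORT A =====
-- c[i+j] += a[i]*b[j]; c[i+j] %= mod   (one inner-loop step)
def convStep (a b : List Int) (mod : Int) (i : Nat) (c : List Int) (j : Nat) : List Int :=
  c.set (i + j) (PySem.Int.mod (c.getD (i + j) 0 + a.getD i 0 * b.getD j 0) mod)

-- for j in range(m): …   (the inner loop for one fixed i)
def convRow (a b : List Int) (mod : Int) (c : List Int) (i : Nat) : List Int :=
  (List.range b.length).foldl (convStep a b mod i) c

-- [0]*(n+m-1) : the only negative Python size is n=m=0 ([]*-1=[]), which Nat truncation
-- also sends to the empty list, so List.replicate (n+m-1) 0 is exact.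
def conv_naive (a : List Int) (b : List Int) (mod : Int) : List Int :=
  (List.range a.length).foldl (convRow a b mod) (List.replicate (a.length + b.length - 1) 0)

-- ===== PORT B =====
-- a[i] * b[k-i]   (i is always in range when produced by the window below)
def altTerm (a b : List Int) (k : Nat) (i : Nat) : Int := a.getD i 0 * b.getD (k - i) 0

-- sum(a[i]*b[k-i] for i in range(max(0, k-m+1), min(k+1, n))) % mod
-- Nat truncated subtraction gives exactly max(0, k-m+1) and the clipped range length.
def altCoeff (a b : List Int) (mod : Int) (k : Nat) : Int :=
  PySem.Int.mod
    (((List.range' (k + 1 - b.length) (min (k + 1) a.length - (k + 1 - b.length))).map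
      (altTerm a b k)).sum) mod

def conv_naive_alt (a : List Int) (b : List Int) (mod : Int) : List Int :=
  (List.range (a.length + b.length - 1)).map (altCoeff a b mod)

-- ===== PRECONDITION & SPEC =====
-- Pre_ excludes mod = 0: there Python A raises ZeroDivisionError whenever a and b are both
-- nonempty, and in the degenerate cases where one input is empty A returns an unreduced
-- zero list while B's single final reduction still divides by zero (B raises).
def Pre_conv_naive (a : List Int) (b : List Int) (mod : Int) : Prop := mod ≠ 0
instance (a : List Int) (b : List Int) (mod : Int) : Decidable (Pre_conv_naive a b mod) := by
  unfold Pre_conv_naive; infer_instance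

def pvWitness_conv_naive : List Int × List Int × Int := ([1, 2], [3], 5)

def Spec_conv_naive (a : List Int) (b : List Int) (mod : Int) (out : List Int) : Prop :=
  out = conv_naive_alt a b mod
instance (a : List Int) (b : List Int) (mod : Int) (out : List Int) :
    Decidable (Spec_conv_naive a b mod out) := by unfold Spec_conv_naive; infer_instance

-- ===== CLAIM (what is proved, stated in full; the proofs are below) =====
def Claim_equal_conv_naive : Prop := ∀ (a : List Int) (b : List Int) (mod : Int),
  Dom_conv_naive a b mod → Pre_conv_naive a b mod → Spec_conv_naive a b mod (conv_naive a b mod)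

-- ===== LEMMAS AND PROOFS =====

-- the i-th row's contribution to coefficient k, as an `if` over the full index range
def rowIf (a b : List Int) (k : Nat) (i : Nat) : Int :=
  if i ≤ k ∧ k < i + b.length then a.getD i 0 * b.getD (k - i) 0 else 0

lemma getD_set (l : List Int) (p : Nat) (v : Int) (k : Nat) :
    (l.set p v).getD k 0 = if p = k ∧ p < l.length then v else l.getD k 0 := by
  simp only [List.getD_eq_getElem?_getD, List.getElem?_set]
  split_ifs with h h1 h2 h3 <;> simp_all <;> omega
  -- (omega discharges the index side conditions)

-- the inner loop (fold over range m) sets each position i ≤ k < i+m (inside the list) once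
lemma foldRow_getD (a b : List Int) (mod : Int) (i : Nat) (m : Nat) (c : List Int) :
    ((List.range m).foldl (convStep a b mod i) c).length = c.length ∧
    ∀ k : Nat, ((List.range m).foldl (convStep a b mod i) c).getD k 0 =
      if i ≤ k ∧ k < i + m ∧ k < c.length
      then PySem.Int.mod (c.getD k 0 + a.getD i 0 * b.getD (k - i) 0) mod
      else c.getD k 0 := by
  induction m with
  | zero =>
    refine ⟨rfl, fun k => ?_⟩
    simp only [List.range_zero, List.foldl_nil]
    rw [if_neg (by omega)]
  | succ m ih =>
    obtain ⟨ihlen, ihget⟩ := ih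
    rw [List.range_succ, List.foldl_append]
    simp only [List.foldl_cons, List.foldl_nil]
    constructor
    · simp [convStep, ihlen]
    · intro k
      rw [convStep]
      have hread := ihget (i + m)
      rw [if_neg (by omega)] at hread
      rw [getD_set, ihlen, hread, ihget k]
      by_cases hk : i + m = k ∧ i + m < c.length
      · obtain ⟨h1, h2⟩ := hk; subst h1
        rw [if_pos ⟨rfl, h2⟩, if_pos (by omega)]
        simp
      · rw [if_neg hk]
        have hiff : (i ≤ k ∧ k < i + (m + 1) ∧ k < c.length) ↔
            (i ≤ k ∧ k < i + m ∧ k < c.length) := by omega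
        simp only [hiff]

lemma sum_rowIf_zero (a b : List Int) (k t : Nat)
    (h : ¬ ∃ i, i < t ∧ i ≤ k ∧ k < i + b.length) :
    ((List.range t).map (rowIf a b k)).sum = 0 := by
  apply List.sum_eq_zero
  intro x hx
  obtain ⟨i, hi, rfl⟩ := List.mem_map.mp hx
  rw [List.mem_range] at hi
  unfold rowIf
  rw [if_neg (fun hc => h ⟨i, hi, hc⟩)]

-- the outer loop: after t rows, position k holds the reduced partial sum (or untouched 0)
lemma foldRows_getD (a b : List Int) (mod : Int) (L : Nat) (t : Nat) :
    ((List.range t).foldl (convRow a b mod) (List.replicate L 0)).length = L ∧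
    ∀ k : Nat, k < L →
      ((List.range t).foldl (convRow a b mod) (List.replicate L 0)).getD k 0 =
      if ∃ i, i < t ∧ i ≤ k ∧ k < i + b.length
      then PySem.Int.mod (((List.range t).map (rowIf a b k)).sum) mod
      else 0 := by
  induction t with
  | zero =>
    refine ⟨by simp, fun k hk => ?_⟩
    rw [if_neg (by rintro ⟨i, hi, -⟩; omega)]
    simp [List.getD_eq_getElem?_getD, hk]
  | succ t ih =>
    obtain ⟨ihlen, ihget⟩ := ih
    rw [List.range_succ, List.foldl_append]
    simp only [List.foldl_cons, List.foldl_nil]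
    obtain ⟨rlen, rget⟩ := foldRow_getD a b mod t b.length
      ((List.range t).foldl (convRow a b mod) (List.replicate L 0))
    refine ⟨by rw [convRow, rlen, ihlen], fun k hk => ?_⟩
    rw [convRow, rget, ihget k hk, ihlen]
    simp only [List.map_append, List.sum_append, List.map_cons, List.map_nil,
      List.sum_cons, List.sum_nil, add_zero]
    by_cases hc : t ≤ k ∧ k < t + b.length
    · rw [if_pos ⟨hc.1, hc.2, hk⟩]
      have hrow : rowIf a b k t = a.getD t 0 * b.getD (k - t) 0 := if_pos hc
      by_cases he : ∃ i, i < t ∧ i ≤ k ∧ k < i + b.length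
      · rw [if_pos he, if_pos ⟨t, by omega, hc⟩, hrow]
        simp only [PySem.Int.mod]
        exact Int.fmod_add_fmod _ _ _
      · rw [if_neg he, if_pos ⟨t, by omega, hc⟩, hrow, sum_rowIf_zero a b k t he, zero_add]
    · rw [if_neg (by omega)]
      have hrow : rowIf a b k t = 0 := if_neg hc
      rw [hrow, add_zero]
      have hiff : (∃ i, i < t + 1 ∧ i ≤ k ∧ k < i + b.length) ↔
          (∃ i, i < t ∧ i ≤ k ∧ k < i + b.length) := by
        constructor
        · rintro ⟨i, h1, h2⟩
          rcases Nat.lt_succ_iff_lt_or_eq.mp h1 with h | rfl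
          · exact ⟨i, h, h2⟩
          · exact absurd h2 hc
        · rintro ⟨i, h1, h2⟩; exact ⟨i, by omega, h2⟩
      simp only [hiff]

-- window form: the `if`-guarded sum over range n equals B's clipped-interval sum
lemma bridge (f : Nat → Int) (k m : Nat) : ∀ n : Nat,
    ((List.range n).map (fun i => if i ≤ k ∧ k < i + m then f i else 0)).sum
    = ((List.range' (k + 1 - m) (min (k + 1) n - (k + 1 - m))).map f).sum := by
  intro n
  induction n with
  | zero => simp
  | succ n ih =>
    rw [List.range_succ, List.map_append, List.sum_append]
    simp only [List.map_cons, List.map_nil, List.sum_cons, List.sum_nil, add_zero]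
    by_cases c1 : n ≤ k ∧ k < n + m
    · rw [if_pos c1]
      have hmin : min (k + 1) (n + 1) = n + 1 := by omega
      have hmin' : min (k + 1) n = n := by omega
      have hlo : k + 1 - m ≤ n := by omega
      have hlen : min (k + 1) (n + 1) - (k + 1 - m) = (n - (k + 1 - m)) + 1 := by omega
      rw [hlen, List.range'_concat]
      simp only [one_mul]
      have hend : k + 1 - m + (n - (k + 1 - m)) = n := by omega
      rw [hend, List.map_append, List.sum_append, ih, hmin']
      simp
    · by_cases c2 : k < n
      · rw [if_neg (by omega), add_zero, ih]
        have : min (k + 1) (n + 1) = min (k + 1) n := by omega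
        rw [this]
      · -- n ≤ k and k ≥ n + m : the window is empty on both sides
        rw [if_neg c1, add_zero, ih]
        have h1 : min (k + 1) (n + 1) - (k + 1 - m) = 0 := by omega
        have h2 : min (k + 1) n - (k + 1 - m) = 0 := by omega
        rw [h1, h2]

lemma conv_eq (a b : List Int) (mod : Int) : conv_naive a b mod = conv_naive_alt a b mod := by
  unfold conv_naive conv_naive_alt
  obtain ⟨hlen, hget⟩ := foldRows_getD a b mod (a.length + b.length - 1) a.length
  apply List.ext_getElem
  · simp [hlen]
  · intro k hk1 hk2
    have hkL : k < a.length + b.length - 1 := by simpa [hlen] using hk1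
    rw [← List.getD_eq_getElem _ 0 hk1, hget k hkL]
    have hB : ((List.range (a.length + b.length - 1)).map (altCoeff a b mod))[k] =
        altCoeff a b mod k := by
      simp
    rw [hB]
    unfold altCoeff
    rw [← bridge (altTerm a b k) k b.length a.length]
    by_cases he : ∃ i, i < a.length ∧ i ≤ k ∧ k < i + b.length
    · rw [if_pos he]
      rfl
    · rw [if_neg he]
      have hz : ((List.range a.length).map
          (fun i => if i ≤ k ∧ k < i + b.length then altTerm a b k i else 0)).sum = 0 := by
        apply List.sum_eq_zero
        intro x hx
        obtain ⟨i, hi, rfl⟩ := List.mem_map.mp hx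
        rw [List.mem_range] at hi
        rw [if_neg (fun hc => he ⟨i, hi, hc⟩)]
      rw [hz]
      simp [PySem.Int.mod, Int.zero_fmod]

-- ===== VERDICT (by name: the statement is the Claim_ definition above) =====
theorem conv_naive_spec : Claim_equal_conv_naive := by
  intro a b mod _ _
  unfold Spec_conv_naive
  exact conv_eq a b mod
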